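-- pv_equiv track=rewrite | github.com/yashbhalla/F1-Telemetry-Strategy-Simulator | api/ingestion_service.py | _get_available_grand_prix
-- ===== SOURCE A (Python) =====
-- from typing import List, Dict, Optional, Tuple
--
-- def _get_available_grand_prix(year: int) -> List[str]:
--     """Get list of available Grand Prix for a given year."""
--     # This is a simplified approach - in practice, you'd want to query FastF1
--     # or maintain a mapping of available GPs per year
--
--     # Common Grand Prix names (this would ideally be dynamic)
--     common_gps = [
--         "Bahrain", "Saudi Arabia", "Australia", "Japan", "China", "Miami",
--         "Emilia Romagna", "Monaco", "Canada", "Spain", "Austria",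
--         "Great Britain", "Hungary", "Belgium", "Netherlands", "Italy",
--         "Azerbaijan", "Singapore", "United States", "Mexico", "Brazil",
--         "Abu Dhabi", "Qatar", "Las Vegas"
--     ]
--
--     # Filter based on year (some GPs didn't exist in certain years)
--     if year < 2016:
--         common_gps = [gp for gp in common_gps if gp not in [
--             "Azerbaijan", "Miami", "Las Vegas"]]
--     if year < 2018:
--         common_gps = [gp for gp in common_gps if gp not in ["Qatar"]]
--     if year < 2021:
--         common_gps = [
--             gp for gp in common_gps if gp not in ["Saudi Arabia"]]
--     if year < 2022:
--         common_gps = [gp for gp in common_gps if gp not in ["Miami"]]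
--     if year < 2023:
--         common_gps = [gp for gp in common_gps if gp not in ["Las Vegas"]]
--
--     return common_gps
-- ===== SOURCE B (Python) =====
-- from typing import List, Dict, Optional, Tuple
--
-- _COMMON_GPS = [
--     "Bahrain", "Saudi Arabia", "Australia", "Japan", "China", "Miami",
--     "Emilia Romagna", "Monaco", "Canada", "Spain", "Austria",
--     "Great Britain", "Hungary", "Belgium", "Netherlands", "Italy",
--     "Azerbaijan", "Singapore", "United States", "Mexico", "Brazil",
--     "Abu Dhabi", "Qatar", "Las Vegas"
-- ]
--
-- # First season each conditional GP is available; Miami's effective threshold is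
-- # 2022 (it is filtered by both the <2016 and <2022 branches of the original).
-- _MIN_YEAR = {
--     "Azerbaijan": 2016,
--     "Qatar": 2018,
--     "Saudi Arabia": 2021,
--     "Miami": 2022,
--     "Las Vegas": 2023,
-- }
--
-- def _get_available_grand_prix(year: int) -> List[str]:
--     """Get list of available Grand Prix for a given year."""
--     return [gp for gp in _COMMON_GPS
--             if (m := _MIN_YEAR.get(gp)) is None or year >= m]
-- ===== Notes on version B (the rewrite author's own statement) =====
-- stated objective: simpler
-- what changed: Replaces A's five sequential year-conditional filter passes over the GP list by a single table-driven pass using a dict of minimum inclusion years (Miami's effective threshold is 2022).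
import Mathlib
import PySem

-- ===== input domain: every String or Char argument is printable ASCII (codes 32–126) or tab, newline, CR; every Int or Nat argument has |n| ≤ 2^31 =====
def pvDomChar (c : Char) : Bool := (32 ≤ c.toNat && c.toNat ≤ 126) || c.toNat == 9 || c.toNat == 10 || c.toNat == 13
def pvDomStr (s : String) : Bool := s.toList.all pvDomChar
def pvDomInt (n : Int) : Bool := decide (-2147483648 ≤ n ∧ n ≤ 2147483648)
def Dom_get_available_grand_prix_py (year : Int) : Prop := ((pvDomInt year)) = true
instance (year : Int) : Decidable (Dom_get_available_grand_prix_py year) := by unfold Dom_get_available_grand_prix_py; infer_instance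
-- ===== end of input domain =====

-- B replaces A's five sequential year-conditional filter passes by one table-driven pass
-- (minimum-inclusion-year dict, single list comprehension); objective: simpler.

-- ===== PORT A =====
def pvCommonGPs : List String :=
  ["Bahrain", "Saudi Arabia", "Australia", "Japan", "China", "Miami",
   "Emilia Romagna", "Monaco", "Canada", "Spain", "Austria",
   "Great Britain", "Hungary", "Belgium", "Netherlands", "Italy",
   "Azerbaijan", "Singapore", "United States", "Mexico", "Brazil",
   "Abu Dhabi", "Qatar", "Las Vegas"]

def get_available_grand_prix_py (year : Int) : List String :=
  let gps := pvCommonGPs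
  let gps := if year < 2016 then
      gps.filter (fun gp => !(["Azerbaijan", "Miami", "Las Vegas"].contains gp)) else gps
  let gps := if year < 2018 then
      gps.filter (fun gp => !(["Qatar"].contains gp)) else gps
  let gps := if year < 2021 then
      gps.filter (fun gp => !(["Saudi Arabia"].contains gp)) else gps
  let gps := if year < 2022 then
      gps.filter (fun gp => !(["Miami"].contains gp)) else gps
  let gps := if year < 2023 then
      gps.filter (fun gp => !(["Las Vegas"].contains gp)) else gps
  gps

-- ===== PORT B =====
def pvMinYear : PySem.Dict String Int := PySem.Dict.mk
  [("Azerbaijan", 2016), ("Qatar", 2018), ("Saudi Arabia", 2021),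
   ("Miami", 2022), ("Las Vegas", 2023)]

def get_available_grand_prix_py_alt (year : Int) : List String :=
  pvCommonGPs.filter (fun gp =>
    match PySem.Dict.get? pvMinYear gp with
    | none => true
    | some m => decide (m ≤ year))

-- ===== PRECONDITION & SPEC =====
def Spec_get_available_grand_prix_py (year : Int) (out : List String) : Prop := out = get_available_grand_prix_py_alt year
instance (year : Int) (out : List String) : Decidable (Spec_get_available_grand_prix_py year out) := by unfold Spec_get_available_grand_prix_py; infer_instance

-- ===== CLAIM (what is proved, stated in full; the proofs are below) =====
def Claim_equal_get_available_grand_prix_py : Prop := ∀ (year : Int), Dom_get_available_grand_prix_py year → Spec_get_available_grand_prix_py year (get_available_grand_prix_py year)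

-- ===== LEMMAS AND PROOFS =====

-- ===== VERDICT (by name: the statement is the Claim_ definition above) =====
theorem get_available_grand_prix_py_spec : Claim_equal_get_available_grand_prix_py := by
  intro year _
  show get_available_grand_prix_py year = get_available_grand_prix_py_alt year
  unfold get_available_grand_prix_py get_available_grand_prix_py_alt
  by_cases h1 : year < 2016 <;> by_cases h2 : year < 2018 <;>
    by_cases h3 : year < 2021 <;> by_cases h4 : year < 2022 <;>
    by_cases h5 : year < 2023 <;>
    first
      | omega
      | (simp only [h1, h2, h3, h4, h5, if_true, if_false, List.filter_filter]
         first
           | (apply List.filter_congr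
              intro gp hgp
              fin_cases hgp <;>
                simp [pvMinYear, PySem.Dict.get?_mk_cons, PySem.Dict.get?,
                  decide_eq_true_eq, decide_eq_false_iff_not] <;> omega)
           | (symm
              rw [List.filter_eq_self]
              intro gp hgp
              fin_cases hgp <;>
                simp [pvMinYear, PySem.Dict.get?_mk_cons, PySem.Dict.get?,
                  decide_eq_true_eq, decide_eq_false_iff_not] <;> omega))
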